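-- pv_equiv track=rewrite | github.com/miliar/Code_Jam_Webscraper | solutions_python/Problem_199/3208.py | getListFromFirstMinus
-- ===== SOURCE A (Python) =====
-- def getListFromFirstMinus(listOfPlusMinus):
--     result = []
--     isFirstMinusPassed = False
--     for element in listOfPlusMinus:
--         if isFirstMinusPassed:
--             result.append(element)
--         else:
--             if element == '-':
--                 isFirstMinusPassed = True
--                 result.append(element)
--     return result
-- ===== SOURCE B (Python) =====
-- def getListFromFirstMinus(listOfPlusMinus):
--     try:
--         idx = listOfPlusMinus.index('-')
--     except ValueError:
--         return []
--     return listOfPlusMinus[idx:]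
-- ===== Notes on version B (the rewrite author's own statement) =====
-- stated objective: simpler
-- what changed: Replaced the boolean-flag accumulation loop (append each element once the first '-' was seen) with a locate-then-slice body: list.index('-') inside try/except ValueError, slicing from that position on success and returning an empty list when no '-' occurs.
import Mathlib
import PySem

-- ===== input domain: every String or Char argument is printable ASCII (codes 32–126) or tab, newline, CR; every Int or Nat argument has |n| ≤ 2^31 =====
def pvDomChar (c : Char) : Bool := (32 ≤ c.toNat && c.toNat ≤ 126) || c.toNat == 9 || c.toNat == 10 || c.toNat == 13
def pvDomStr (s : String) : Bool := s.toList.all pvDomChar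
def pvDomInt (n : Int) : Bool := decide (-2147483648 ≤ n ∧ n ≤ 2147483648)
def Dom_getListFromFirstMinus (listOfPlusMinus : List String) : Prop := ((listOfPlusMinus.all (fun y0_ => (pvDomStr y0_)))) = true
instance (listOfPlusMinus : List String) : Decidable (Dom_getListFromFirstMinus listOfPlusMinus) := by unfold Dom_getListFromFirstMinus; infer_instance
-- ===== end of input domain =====

-- B replaces A's boolean-flag accumulation loop with locate-then-slice (index of first '-', then a slice); objective: simpler.

-- ===== PORT A =====
def getListFromFirstMinus (listOfPlusMinus : List String) : List String :=
  (listOfPlusMinus.foldl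
    (fun (st : List String × Bool) element =>
      if st.2 then (st.1 ++ [element], st.2)
      else if element = "-" then (st.1 ++ [element], true) else st)
    (([] : List String), false)).1

-- ===== PORT B =====
def getListFromFirstMinus_alt (listOfPlusMinus : List String) : List String :=
  match PySem.List.index? listOfPlusMinus "-" with
  | none => []                                            -- except ValueError: return []
  | some idx => PySem.List.slice listOfPlusMinus (some (idx : Int)) none   -- listOfPlusMinus[idx:]

-- ===== PRECONDITION & SPEC =====
def Spec_getListFromFirstMinus (listOfPlusMinus : List String) (out : List String) : Prop := out = getListFromFirstMinus_alt listOfPlusMinus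
instance (listOfPlusMinus : List String) (out : List String) : Decidable (Spec_getListFromFirstMinus listOfPlusMinus out) := by unfold Spec_getListFromFirstMinus; infer_instance

-- ===== CLAIM (what is proved, stated in full; the proofs are below) =====
def Claim_equal_getListFromFirstMinus : Prop := ∀ (listOfPlusMinus : List String), Dom_getListFromFirstMinus listOfPlusMinus → Spec_getListFromFirstMinus listOfPlusMinus (getListFromFirstMinus listOfPlusMinus)

-- ===== LEMMAS AND PROOFS =====

-- once the flag is true, A's loop appends every remaining element
theorem pvFoldTrue (l : List String) (acc : List String) :
    l.foldl
      (fun (st : List String × Bool) element =>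
        if st.2 then (st.1 ++ [element], st.2)
        else if element = "-" then (st.1 ++ [element], true) else st)
      (acc, true) = (acc ++ l, true) := by
  induction l generalizing acc with
  | nil => simp
  | cons x xs ih => simp [List.foldl, ih]

theorem pvMain (l : List String) :
    getListFromFirstMinus l = getListFromFirstMinus_alt l := by
  induction l with
  | nil => rfl
  | cons x xs ih =>
    by_cases hx : x = "-"
    · subst hx
      simp only [getListFromFirstMinus, List.foldl, Bool.false_eq_true, if_false, ite_true]
      rw [pvFoldTrue]
      simp only [getListFromFirstMinus_alt, PySem.List.index?_cons_self]
      rw [PySem.List.slice_from_natCast]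
      simp
    · simp only [getListFromFirstMinus, getListFromFirstMinus_alt, List.foldl,
        Bool.false_eq_true, if_false, if_neg hx] at ih ⊢
      rw [PySem.List.index?_cons_of_ne _ hx]
      cases hidx : PySem.List.index? xs "-" with
      | none => rw [hidx] at ih; simpa using ih
      | some i =>
        rw [hidx] at ih
        simp only [Option.map_some]
        simp only [PySem.List.slice_from_natCast] at ih ⊢
        simpa [List.drop] using ih

-- ===== VERDICT (by name: the statement is the Claim_ definition above) =====
theorem getListFromFirstMinus_spec : Claim_equal_getListFromFirstMinus := by
  intro l _
  exact pvMain l
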